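-- pv_equiv track=rewrite | github.com/kenirerih-sketch/depscope | scripts/hackage_first_published.py | earliest
-- ===== SOURCE A (Python) =====
-- def earliest(versions):
--     """Sort Hackage-style versions (1.2.3.4) and return the smallest."""
--     if not versions:
--         return None
--     def key(v):
--         try:
--             return tuple(int(x) for x in str(v).split("."))
--         except Exception:
--             return (0,)
--     try:
--         return sorted(versions, key=key)[0]
--     except Exception:
--         return versions[0]
-- ===== SOURCE B (Python) =====
-- def earliest(versions):
--     """Single-pass minimum scan instead of sorting; first element wins ties."""
--     if not versions:
--         return None
--     def key(v):
--         try: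
--             return tuple(int(x) for x in str(v).split("."))
--         except Exception:
--             return (0,)
--     best = versions[0]
--     best_key = key(best)
--     for v in versions[1:]:
--         k = key(v)
--         if k < best_key:
--             best, best_key = v, k
--     return best
-- ===== Notes on version B (the rewrite author's own statement) =====
-- stated objective: simpler
-- what changed: Replaces sort-then-take-first (and its now-unneeded try/except around the sort) with a single linear scan that keeps the first element of minimal key, comparing with strict < to preserve the stable-sort first-minimum tie-break.
import Mathlib
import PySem

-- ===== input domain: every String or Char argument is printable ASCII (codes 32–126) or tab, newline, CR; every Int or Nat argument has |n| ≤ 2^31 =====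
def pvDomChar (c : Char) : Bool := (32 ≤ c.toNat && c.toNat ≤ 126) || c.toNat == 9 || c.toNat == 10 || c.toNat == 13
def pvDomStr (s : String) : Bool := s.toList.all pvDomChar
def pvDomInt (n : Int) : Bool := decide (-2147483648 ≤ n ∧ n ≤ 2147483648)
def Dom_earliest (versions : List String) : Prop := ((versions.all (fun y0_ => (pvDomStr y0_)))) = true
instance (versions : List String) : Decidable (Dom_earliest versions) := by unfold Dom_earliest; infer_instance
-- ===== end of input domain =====

-- B replaces A's sort-then-take-first by a single linear min-scan (strict <, first minimum wins): simpler, no sort.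


-- ===== PORT A =====
-- the nested `key(v)`: split on "." (sep is the literal ".", never "", so split? is `some`),
-- int() each piece; any ValueError makes the whole tuple (0,).  Identical in A and B.
def pvKey (v : String) : List Int :=
  match ((PySem.Str.split? v ".").getD []).mapM PySem.Int.ofStr? with
  | some ks => ks
  | none => [0]

def earliest (versions : List String) : Option String :=
  match versions with
  | [] => none                                   -- `if not versions: return None`
  | v0 :: _ =>
    -- `try: return sorted(versions, key=key)[0] except: return versions[0]`
    -- (int-tuple comparison cannot raise; the only modeled failure is the [0] index)
    match PySem.List.pyGet? (PySem.List.sorted versions pvKey false) 0 with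
    | some w => some w
    | none => some v0

-- ===== PORT B =====
def earliest_alt (versions : List String) : Option String :=
  match versions with
  | [] => none
  | v0 :: rest =>
    some ((rest.foldl
      (fun (bp : String × List Int) x =>
        let k := pvKey x
        if k < bp.2 then (x, k) else bp)
      (v0, pvKey v0)).1)

-- ===== PRECONDITION & SPEC =====
def Spec_earliest (versions : List String) (out : Option String) : Prop := out = earliest_alt versions
instance (versions : List String) (out : Option String) : Decidable (Spec_earliest versions out) := by unfold Spec_earliest; infer_instance

-- ===== CLAIM (what is proved, stated in full; the proofs are below) =====
def Claim_equal_earliest : Prop := ∀ (versions : List String), Dom_earliest versions → Spec_earliest versions (earliest versions)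

-- ===== LEMMAS AND PROOFS =====

-- the pair-scan of B equals the plain best-element scan (the stored key is always pvKey of the best)
theorem pv_scan_pair (rest : List String) (b : String) (k : List Int) (hk : k = pvKey b) :
    (rest.foldl (fun (bp : String × List Int) x =>
        let kk := pvKey x
        if kk < bp.2 then (x, kk) else bp) (b, k)).1
    = rest.foldl (fun b x => if pvKey x < pvKey b then x else b) b := by
  induction rest generalizing b k with
  | nil => simp
  | cons y ys ih =>
    subst hk
    simp only [List.foldl]
    by_cases h : pvKey y < pvKey b
    · simp only [h]; exact ih y (pvKey y) rfl
    · simp only [h]; exact ih b (pvKey b) rfl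

-- head of the insertion-sort fold over a nonempty accumulator is the strict-< min-scan result
theorem pv_head_insert (rest : List String) (h : String) (t : List String) :
    ∃ t', rest.foldl (fun acc x => PySem.List.insertBy (fun a b => decide (pvKey a < pvKey b)) x acc) (h :: t)
          = (rest.foldl (fun b x => if pvKey x < pvKey b then x else b) h) :: t' := by
  induction rest generalizing h t with
  | nil => exact ⟨t, rfl⟩
  | cons y ys ih =>
    simp only [List.foldl, PySem.List.insertBy]
    by_cases hc : pvKey y < pvKey h
    · simp only [hc, decide_true, if_pos]
      exact ih y (h :: t)
    · simp only [hc, decide_false, if_false]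
      exact ih h (PySem.List.insertBy (fun a b => decide (pvKey a < pvKey b)) y t)

-- ===== VERDICT (by name: the statement is the Claim_ definition above) =====
theorem earliest_spec : Claim_equal_earliest := by
  intro versions _
  unfold Spec_earliest
  cases versions with
  | nil => rfl
  | cons v0 rest =>
    have hs : PySem.List.sorted (v0 :: rest) pvKey false
        = rest.foldl (fun acc x => PySem.List.insertBy (fun a b => decide (pvKey a < pvKey b)) x acc) [v0] := by
      rw [PySem.List.sorted_eq_foldl_insertBy]
      rfl
    obtain ⟨t', ht⟩ := pv_head_insert rest v0 []
    simp only [earliest, earliest_alt, hs, ht, pv_scan_pair rest v0 (pvKey v0) rfl]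
    simp [PySem.List.pyGet?, PySem.List.pyIdx?]
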